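-- pv_equiv track=rewrite | github.com/u-tokyo-gps-tanaka-lab/shogilib | src/research/fen_to_eval_cmd.py | fen_to_sfen
-- ===== SOURCE A (Python) =====
-- def fen_to_sfen(l):
--     cs = l.split(" ")
--     color = "w" if cs[1] == "b" else "b"
--     onboard, hand = cs[0].split("[")
--     pchar = " "
--     pcount = 0
--     hlist = []
--     for c in hand:
--         if c == "]":
--             break
--         if c != pchar:
--             if pcount > 1:
--                 hlist.append(str(pcount))
--             if pcount > 0:
--                 hlist.append(pchar)
--             pcount = 0
--             pchar = c
--         pcount += 1
--     if pcount == 0: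
--         hlist.append("-")
--     else:
--         if pcount > 1:
--             hlist.append(str(pcount))
--         hlist.append(pchar)
--     return f"{onboard} {color} {''.join(hlist)} 0"
-- ===== SOURCE B (Python) =====
-- def fen_to_sfen(l):
--     cs = l.split(" ")
--     color = "w" if cs[1] == "b" else "b"
--     onboard, hand = cs[0].split("[")
--     parts = []
--     i = 0
--     n = len(hand)
--     while i < n and hand[i] != "]":
--         j = i + 1
--         while j < n and hand[j] == hand[i]:
--             j += 1
--         if j - i > 1:
--             parts.append(str(j - i))
--         parts.append(hand[i])
--         i = j
--     hs = "".join(parts) if parts else "-"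
--     return f"{onboard} {color} {hs} 0"
-- ===== Notes on version B (the rewrite author's own statement) =====
-- stated objective: alternative
-- what changed: The hand encoding is computed by a two-pointer run scan (inner while advances over each run, stopping at ']' or end) instead of A's per-character state machine carrying pchar/pcount with flush-on-change and a separate post-loop flush.
import Mathlib
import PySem

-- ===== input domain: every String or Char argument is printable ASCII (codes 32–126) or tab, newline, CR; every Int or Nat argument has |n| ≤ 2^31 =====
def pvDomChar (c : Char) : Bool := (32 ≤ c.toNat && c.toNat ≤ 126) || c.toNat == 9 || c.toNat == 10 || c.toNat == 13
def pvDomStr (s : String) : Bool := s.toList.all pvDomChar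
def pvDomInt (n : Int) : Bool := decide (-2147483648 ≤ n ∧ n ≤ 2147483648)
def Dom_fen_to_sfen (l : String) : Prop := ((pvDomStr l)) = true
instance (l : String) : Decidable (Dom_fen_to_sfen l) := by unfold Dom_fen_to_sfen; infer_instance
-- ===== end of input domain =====

-- B replaces A's per-character pending-run state machine (pchar/pcount with flush-on-change) by a
-- two-pointer run scan that stops at ']' (objective: alternative; same cost).

-- ===== PORT A =====
-- the for-loop over hand: state (pchar, pcount, hlist); break at ']'
def fen_to_sfen_loopA : List Char → Char → Nat → List (List Char) → Char × Nat × List (List Char)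
  | [], p, n, acc => (p, n, acc)
  | c :: rest, p, n, acc =>
    if c = ']' then (p, n, acc)
    else if c ≠ p then
      fen_to_sfen_loopA rest c 1
        (acc ++ (if n > 1 then [(PySem.Int.toStr (n : Int)).toList] else [])
             ++ (if n > 0 then [[p]] else []))
    else fen_to_sfen_loopA rest p (n + 1) acc

def fen_to_sfen (l : String) : String :=
  let cs := PySem.Chars.splitOn l.toList [' ']
  let color := if (PySem.List.pyGet? cs 1).getD [] = ['b'] then ['w'] else ['b']
  let parts := PySem.Chars.splitOn (cs.headD []) ['[']
  let onboard := parts.headD []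
  let hand := (PySem.List.pyGet? parts 1).getD []
  let st := fen_to_sfen_loopA hand ' ' 0 []
  let hlist := st.2.2 ++
    (if st.2.1 = 0 then [['-']]
     else (if st.2.1 > 1 then [(PySem.Int.toStr (st.2.1 : Int)).toList] else []) ++ [[st.1]])
  String.ofList (onboard ++ [' '] ++ color ++ [' '] ++ hlist.flatten ++ [' ', '0'])

-- ===== PORT B =====
-- the two-pointer while loop: i stops at ']' or end; j scans the run of hand[i]
def fen_to_sfen_runsB : List Char → List (List Char)
  | [] => []
  | c :: rest =>
    if c = ']' then []
    else
      ((if (rest.takeWhile (· == c)).length + 1 > 1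
         then [(PySem.Int.toStr (((rest.takeWhile (· == c)).length + 1 : Nat) : Int)).toList]
         else []) ++ [[c]])
        ++ fen_to_sfen_runsB (rest.dropWhile (· == c))
termination_by l => l.length
decreasing_by
  simpa using Nat.lt_succ_of_le (List.length_dropWhile_le _ _)

def fen_to_sfen_alt (l : String) : String :=
  let cs := PySem.Chars.splitOn l.toList [' ']
  let color := if (PySem.List.pyGet? cs 1).getD [] = ['b'] then ['w'] else ['b']
  let parts := PySem.Chars.splitOn (cs.headD []) ['[']
  let onboard := parts.headD []
  let hand := (PySem.List.pyGet? parts 1).getD []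
  let ps := fen_to_sfen_runsB hand
  let hs := if ps = [] then [['-']] else ps
  String.ofList (onboard ++ [' '] ++ color ++ [' '] ++ hs.flatten ++ [' ', '0'])

-- ===== PRECONDITION & SPEC =====
-- Pre_ excludes exactly the inputs where A (and B alike) raises: fewer than two space-separated
-- fields (cs[1] IndexError) or cs[0] not containing exactly one '[' (unpacking ValueError).
def Pre_fen_to_sfen (l : String) : Prop :=
  2 ≤ (PySem.Chars.splitOn l.toList [' ']).length ∧
  (PySem.Chars.splitOn ((PySem.Chars.splitOn l.toList [' ']).headD []) ['[']).length = 2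
instance (l : String) : Decidable (Pre_fen_to_sfen l) := by unfold Pre_fen_to_sfen; infer_instance

def pvWitness_fen_to_sfen : String := "ab[Pp] w"

def Spec_fen_to_sfen (l : String) (out : String) : Prop := out = fen_to_sfen_alt l
instance (l : String) (out : String) : Decidable (Spec_fen_to_sfen l out) := by unfold Spec_fen_to_sfen; infer_instance

-- ===== CLAIM (what is proved, stated in full; the proofs are below) =====
def Claim_equal_fen_to_sfen : Prop := ∀ (l : String), Dom_fen_to_sfen l → Pre_fen_to_sfen l → Spec_fen_to_sfen l (fen_to_sfen l)

-- ===== LEMMAS AND PROOFS =====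

-- what A's tail code emits for a pending run (p, n) with n ≥ 1
def fenEmit (p : Char) (n : Nat) : List (List Char) :=
  (if n > 1 then [(PySem.Int.toStr (n : Int)).toList] else []) ++ [[p]]

def fenFinish (st : Char × Nat × List (List Char)) : List (List Char) :=
  st.2.2 ++
    (if st.2.1 = 0 then [['-']]
     else (if st.2.1 > 1 then [(PySem.Int.toStr (st.2.1 : Int)).toList] else []) ++ [[st.1]])

lemma loopA_pending (cs : List Char) : ∀ (p : Char) (n : Nat) (acc : List (List Char)),
    1 ≤ n → p ≠ ']' →
    fenFinish (fen_to_sfen_loopA cs p n acc)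
      = acc ++ fenEmit p (n + (cs.takeWhile (· == p)).length)
            ++ fen_to_sfen_runsB (cs.dropWhile (· == p)) := by
  induction cs with
  | nil =>
    intro p n acc hn hp
    simp [fen_to_sfen_loopA, fenFinish, fen_to_sfen_runsB, fenEmit, Nat.pos_iff_ne_zero.mp hn]
  | cons c rest ih =>
    intro p n acc hn hp
    by_cases hcp : c = p
    · subst hcp
      have hcb : c ≠ ']' := hp
      rw [show fen_to_sfen_loopA (c :: rest) c n acc = fen_to_sfen_loopA rest c (n + 1) acc by
        simp [fen_to_sfen_loopA, hcb]]
      rw [ih c (n + 1) acc (by omega) hp]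
      simp [List.takeWhile, List.dropWhile]
      ring_nf
    · by_cases hcb : c = ']'
      · subst hcb
        have h1 : fen_to_sfen_loopA (']' :: rest) p n acc = (p, n, acc) := by
          simp [fen_to_sfen_loopA]
        rw [h1]
        have hne : (']' == p) = false := by simpa using hcp
        have htw : (']' :: rest).takeWhile (· == p) = [] := by
          simp [hne]
        have hdw : (']' :: rest).dropWhile (· == p) = ']' :: rest := by
          simp [hne]
        rw [htw, hdw]
        simp [fenFinish, fenEmit, fen_to_sfen_runsB, Nat.pos_iff_ne_zero.mp hn]
      · have h1 : fen_to_sfen_loopA (c :: rest) p n acc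
            = fen_to_sfen_loopA rest c 1
                (acc ++ (if n > 1 then [(PySem.Int.toStr (n : Int)).toList] else [])
                     ++ (if n > 0 then [[p]] else [])) := by
          simp [fen_to_sfen_loopA, hcb, hcp]
        rw [h1, ih c 1 _ (by omega) hcb]
        have hne : (c == p) = false := by simpa using hcp
        have htw : (c :: rest).takeWhile (· == p) = [] := by
          simp [hne]
        have hdw : (c :: rest).dropWhile (· == p) = c :: rest := by
          simp [hne]
        rw [htw, hdw]
        have hrB : fen_to_sfen_runsB (c :: rest)
            = ((if (rest.takeWhile (· == c)).length + 1 > 1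
                 then [(PySem.Int.toStr (((rest.takeWhile (· == c)).length + 1 : Nat) : Int)).toList]
                 else []) ++ [[c]])
              ++ fen_to_sfen_runsB (rest.dropWhile (· == c)) := by
          rw [fen_to_sfen_runsB]
          simp [hcb]
        rw [hrB]
        have hn' : 0 < n := hn
        simp [fenEmit, hn', Nat.one_add]

lemma loopA_start (cs : List Char) :
    fenFinish (fen_to_sfen_loopA cs ' ' 0 [])
      = (if fen_to_sfen_runsB cs = [] then [['-']] else fen_to_sfen_runsB cs) := by
  cases cs with
  | nil => simp [fen_to_sfen_loopA, fenFinish, fen_to_sfen_runsB]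
  | cons c rest =>
    by_cases hcb : c = ']'
    · subst hcb
      simp [fen_to_sfen_loopA, fenFinish, fen_to_sfen_runsB]
    · have hstep : fen_to_sfen_loopA (c :: rest) ' ' 0 [] = fen_to_sfen_loopA rest c 1 [] := by
        by_cases hsp : c = ' '
        · subst hsp; simp [fen_to_sfen_loopA, hcb]
        · simp [fen_to_sfen_loopA, hcb, hsp]
      have hrB : fen_to_sfen_runsB (c :: rest)
          = ((if (rest.takeWhile (· == c)).length + 1 > 1
               then [(PySem.Int.toStr (((rest.takeWhile (· == c)).length + 1 : Nat) : Int)).toList]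
               else []) ++ [[c]])
            ++ fen_to_sfen_runsB (rest.dropWhile (· == c)) := by
        rw [fen_to_sfen_runsB]; simp [hcb]
      have hne : fen_to_sfen_runsB (c :: rest) ≠ [] := by
        rw [hrB]; simp
      rw [hstep, loopA_pending rest c 1 [] (by omega) hcb, if_neg hne, hrB]
      simp [fenEmit, Nat.one_add]

-- ===== VERDICT (by name: the statement is the Claim_ definition above) =====
theorem fen_to_sfen_spec : Claim_equal_fen_to_sfen := by
  intro l _ _
  unfold Spec_fen_to_sfen fen_to_sfen fen_to_sfen_alt
  have h := loopA_start
    ((PySem.List.pyGet? (PySem.Chars.splitOn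
        ((PySem.Chars.splitOn l.toList [' ']).headD []) ['[']) 1).getD [])
  simp only [fenFinish] at h
  simp only []
  rw [h]
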